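-- pv_equiv track=rewrite | github.com/Mphele/bhungane.py | second_step/final_destination.py | text_pipeline_processor
-- ===== SOURCE A (Python) =====
-- def text_pipeline_processor(raw_texts:list[str], transformations):
--     """
--     Apply a sequence of transformations to a list of strings.
--
--     Args:
--         raw_texts: List of strings
--         transformations: List of transformation names
--
--     Available transformations:
--         - "uppercase": convert to uppercase
--         - "strip": remove leading/trailing whitespace
--         - "remove_empty": remove empty strings
--         - "reverse": reverse each string
--
--     Returns:
--         list: Transformed data
--
--     Raises:
--         ValueError: For unknown transformations
--     """
--
--     if not all(word in ["uppercase", "strip", "remove_empty", "reverse"] for word in transformations ):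
--         raise ValueError
--
--     edited = raw_texts.copy()
--     for trans in transformations:
--         if trans == "uppercase":
--             edited = [word.upper() for word in edited]
--
--         elif trans =="strip":
--             edited = [word.strip() for word in edited]
--
--         elif trans =="remove_empty":
--             edited = [word for word in edited if word]
--
--         else:
--             edited = [word[::-1] for word in edited]
--
--     return edited
-- ===== SOURCE B (Python) =====
-- def text_pipeline_processor(raw_texts: list[str], transformations):
--     """Single pass over raw_texts with an inner transformation loop,
--     instead of one full-list pass per transformation."""
--     allowed = {"uppercase", "strip", "remove_empty", "reverse"}
--     if not all(word in allowed for word in transformations):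
--         raise ValueError
--
--     result = []
--     for word in raw_texts:
--         dropped = False
--         for trans in transformations:
--             if trans == "remove_empty":
--                 if not word:
--                     dropped = True
--                     break
--             elif trans == "uppercase":
--                 word = word.upper()
--             elif trans == "strip":
--                 word = word.strip()
--             else:
--                 word = word[::-1]
--         if not dropped:
--             result.append(word)
--     return result
-- ===== Notes on version B (the rewrite author's own statement) =====
-- stated objective: alternative
-- what changed: Replaces A's one full-list comprehension per transformation (rebuilding the list m times) with a single pass over raw_texts that threads each word through the transformation list, dropping it early on remove_empty.
import Mathlib
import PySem

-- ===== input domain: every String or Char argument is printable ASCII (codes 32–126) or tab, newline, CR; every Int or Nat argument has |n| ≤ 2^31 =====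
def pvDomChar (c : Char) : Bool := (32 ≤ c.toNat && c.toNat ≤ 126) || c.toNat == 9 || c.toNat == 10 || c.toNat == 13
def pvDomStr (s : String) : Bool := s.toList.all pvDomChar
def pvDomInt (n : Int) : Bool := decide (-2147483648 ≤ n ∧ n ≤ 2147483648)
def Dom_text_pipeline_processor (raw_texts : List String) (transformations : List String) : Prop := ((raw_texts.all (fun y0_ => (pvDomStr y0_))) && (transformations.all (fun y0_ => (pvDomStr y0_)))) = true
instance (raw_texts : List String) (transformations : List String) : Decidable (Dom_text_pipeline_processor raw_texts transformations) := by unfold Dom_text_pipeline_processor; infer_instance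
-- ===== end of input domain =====

-- B replaces A's one list comprehension per transformation by a single pass over the
-- words, threading each word through the transformation list (objective: alternative).

-- ===== PORT A =====
-- one iteration of A's 'for trans in transformations' loop (the four comprehensions)
def pvStepA (edited : List String) (trans : String) : List String :=
  if trans = "uppercase" then edited.map PySem.Str.upper
  else if trans = "strip" then edited.map PySem.Str.strip
  else if trans = "remove_empty" then edited.filter (fun w => !(w == ""))
  else edited.map (fun w => (PySem.Str.slice? w none none (-1)).getD w)  -- w[::-1]

def text_pipeline_processor (raw_texts : List String) (transformations : List String) : List String :=
  transformations.foldl pvStepA raw_texts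

-- ===== PORT B =====
-- B's inner loop: thread one word through the transformations; none = dropped
def pvWordB (w : String) : List String → Option String
  | [] => some w
  | t :: ts =>
    if t = "remove_empty" then
      if w == "" then none else pvWordB w ts
    else if t = "uppercase" then pvWordB (PySem.Str.upper w) ts
    else if t = "strip" then pvWordB (PySem.Str.strip w) ts
    else pvWordB ((PySem.Str.slice? w none none (-1)).getD w) ts  -- w[::-1]

def text_pipeline_processor_alt (raw_texts : List String) (transformations : List String) : List String :=
  raw_texts.filterMap (fun w => pvWordB w transformations)

-- ===== PRECONDITION & SPEC =====
-- A raises a bare ValueError when some transformation name is unknown; B raises there too.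
def Pre_text_pipeline_processor (raw_texts : List String) (transformations : List String) : Prop :=
  ∀ t ∈ transformations, t ∈ ["uppercase", "strip", "remove_empty", "reverse"]
instance (raw_texts : List String) (transformations : List String) : Decidable (Pre_text_pipeline_processor raw_texts transformations) := by unfold Pre_text_pipeline_processor; infer_instance

def pvWitness_text_pipeline_processor : List String × List String :=
  ([" ab ", "", "cd"], ["strip", "remove_empty", "reverse"])

def Spec_text_pipeline_processor (raw_texts : List String) (transformations : List String) (out : List String) : Prop := out = text_pipeline_processor_alt raw_texts transformations
instance (raw_texts : List String) (transformations : List String) (out : List String) : Decidable (Spec_text_pipeline_processor raw_texts transformations out) := by unfold Spec_text_pipeline_processor; infer_instance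

-- ===== CLAIM (what is proved, stated in full; the proofs are below) =====
def Claim_equal_text_pipeline_processor : Prop := ∀ (raw_texts : List String) (transformations : List String), Dom_text_pipeline_processor raw_texts transformations → Pre_text_pipeline_processor raw_texts transformations → Spec_text_pipeline_processor raw_texts transformations (text_pipeline_processor raw_texts transformations)

-- ===== LEMMAS AND PROOFS =====
theorem filterMap_filter_not_empty (l : List String) (g : String → Option String) :
    (l.filter (fun w => !(w == ""))).filterMap g
      = l.filterMap (fun w => if w == "" then none else g w) := by
  induction l with
  | nil => rfl
  | cons a l ih =>
    by_cases h : a = "" <;> simp [List.filterMap_cons, h, ih]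

theorem main_lemma (ts : List String) (l : List String) :
    ts.foldl pvStepA l = l.filterMap (fun w => pvWordB w ts) := by
  induction ts generalizing l with
  | nil => simp [pvWordB]
  | cons t ts ih =>
    rw [List.foldl_cons, ih]
    by_cases h1 : t = "uppercase"
    · simp [pvStepA, pvWordB, h1, List.filterMap_map]
    by_cases h2 : t = "strip"
    · simp [pvStepA, pvWordB, h2, List.filterMap_map]
    by_cases h3 : t = "remove_empty"
    · subst h3
      have h : pvStepA l "remove_empty" = l.filter (fun w => !(w == "")) := by
        simp [pvStepA]
      rw [h, filterMap_filter_not_empty]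
      simp [pvWordB]
    · simp [pvStepA, pvWordB, h1, h2, h3, List.filterMap_map]

-- ===== VERDICT (by name: the statement is the Claim_ definition above) =====
theorem text_pipeline_processor_spec : Claim_equal_text_pipeline_processor := by
  intro raw ts _ _
  unfold Spec_text_pipeline_processor text_pipeline_processor text_pipeline_processor_alt
  exact main_lemma ts raw
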